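-- pv_equiv track=rewrite | github.com/ahmetabdullahoglu/CEMS | app/db/models/__init__.py | get_dependency_level
-- ===== SOURCE A (Python) =====
-- def get_dependency_level(table_name: str, dependencies_map: dict) -> int:
--     """
--     Calculate dependency level for a table.
--
--     Args:
--         table_name: Name of the table
--         dependencies_map: Map of table dependencies
--
--     Returns:
--         int: Dependency level
--     """
--     if table_name not in dependencies_map:
--         return 0
--
--     dependencies = dependencies_map[table_name]
--     if not dependencies:
--         return 0
--
--     max_level = 0
--     for dep in dependencies:
--         dep_level = get_dependency_level(dep, dependencies_map)
--         max_level = max(max_level, dep_level)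
--
--     return max_level + 1
-- ===== SOURCE B (Python) =====
-- def get_dependency_level(table_name: str, dependencies_map: dict) -> int:
--     """Dependency level via memoized depth-first search: each table's level is
--     computed once and cached, so shared dependencies are not re-explored."""
--     memo = {}
--
--     def level(u):
--         if u in memo:
--             return memo[u]
--         r = 1 + max((level(d) for d in dependencies_map.get(u, ())), default=-1)
--         memo[u] = r
--         return r
--
--     return level(table_name)
-- ===== Notes on version B (the rewrite author's own statement) =====
-- stated objective: alternative
-- what changed: Replaces A's naive recursion, which re-explores shared dependencies once per path, by a memoized depth-first search that caches each table's level in a dict and computes it once; Pre_ excludes exactly the inputs with a dependency cycle reachable from table_name, on which both A and B raise RecursionError.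
import Mathlib
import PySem

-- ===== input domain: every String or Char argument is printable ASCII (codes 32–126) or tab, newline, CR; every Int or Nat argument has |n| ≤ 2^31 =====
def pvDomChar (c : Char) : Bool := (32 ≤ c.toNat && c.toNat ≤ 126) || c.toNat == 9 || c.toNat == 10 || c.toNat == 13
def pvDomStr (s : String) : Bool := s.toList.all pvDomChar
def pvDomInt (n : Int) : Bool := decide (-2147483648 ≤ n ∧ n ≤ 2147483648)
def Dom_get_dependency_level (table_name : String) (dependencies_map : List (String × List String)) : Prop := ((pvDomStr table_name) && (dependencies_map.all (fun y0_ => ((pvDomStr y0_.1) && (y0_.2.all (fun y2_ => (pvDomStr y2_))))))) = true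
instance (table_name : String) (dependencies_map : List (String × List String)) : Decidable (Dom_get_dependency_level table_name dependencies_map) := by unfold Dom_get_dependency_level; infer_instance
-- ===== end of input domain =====

-- B replaces A's naive recursion by a memoized depth-first search that caches each table's
-- level in a dict and computes it once; equal return values whenever no dependency cycle is
-- reachable from table_name (Pre_); on the excluded inputs both Pythons raise RecursionError.

-- ===== PORT A =====
-- dict lookup (first match, per the association-list convention): dependencies_map[u] / 'u in dependencies_map'
def pvDget (m : List (String × List String)) (u : String) : Option (List String) :=
  (m.find? (fun p => p.1 == u)).map Prod.snd

-- fuel bound: strictly more than the number of distinct table names mentioned anywhere in the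
-- map, so it never runs out on an acyclic map (proved below); the Python has no such bound.
def pvFuel (m : List (String × List String)) : Nat :=
  m.length + (m.map (fun p => p.2.length)).sum + 1

-- A's recursion, step for step; fuel only makes the (Python-divergent) cyclic case total
def pvALevel (m : List (String × List String)) : Nat → String → Int
  | 0, _ => 0
  | f + 1, u =>
    match pvDget m u with
    | none => 0                                   -- table_name not in dependencies_map
    | some deps =>
      if deps = [] then 0                          -- if not dependencies
      else (deps.foldl (fun mx d => max mx (pvALevel m f d)) 0) + 1   -- max_level loop, then +1

def get_dependency_level (table_name : String) (dependencies_map : List (String × List String)) : Int :=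
  pvALevel dependencies_map (pvFuel dependencies_map) table_name

-- ===== PORT B =====
-- memoized DFS (Source B's inner 'level'); 'max(gen, default=-1)' is a running max started at -1
-- (exact: the generator is consumed left to right); memo dict threaded through; same fuel note.
mutual
def pvBLevel (m : List (String × List String)) : Nat → PySem.Dict String Int → String → Int × PySem.Dict String Int
  | 0, memo, _ => (0, memo)                        -- fuel exhausted (Python diverges; outside Pre_)
  | f + 1, memo, u =>
    match memo.get? u with
    | some v => (v, memo)                          -- if u in memo
    | none =>
      let deps := (pvDget m u).getD []             -- dependencies_map.get(u, ())
      let (mx, memo') := pvBMax m f memo deps (-1)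
      let r := 1 + mx                              -- 1 + max(..., default=-1)
      (r, memo'.insert u r)                        -- memo[u] = r; return r
  termination_by f _ _ => (f, 0)
def pvBMax (m : List (String × List String)) : Nat → PySem.Dict String Int → List String → Int → Int × PySem.Dict String Int
  | _, memo, [], acc => (acc, memo)
  | f, memo, d :: ds, acc =>
    let (v, memo') := pvBLevel m f memo d
    pvBMax m f memo' ds (max acc v)
  termination_by f _ ds _ => (f, ds.length + 1)
end


def get_dependency_level_alt (table_name : String) (dependencies_map : List (String × List String)) : Int :=
  (pvBLevel dependencies_map (pvFuel dependencies_map) PySem.Dict.empty table_name).1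

-- ===== PRECONDITION & SPEC =====
-- dependency-closure machinery used to STATE acyclicity (graph reachability, not either port's algorithm)
def pvDeps (m : List (String × List String)) (u : String) : List String := (pvDget m u).getD []
def pvElems (m : List (String × List String)) : Finset String :=
  (m.map Prod.fst ++ m.flatMap Prod.snd).toFinset
def pvStep (m : List (String × List String)) (S : Finset String) : Finset String :=
  S ∪ S.biUnion (fun u => (pvDeps m u).toFinset)
-- all names reachable from u along dependency edges (iterated enough times to saturate)
def pvClo (m : List (String × List String)) (u : String) : Finset String :=
  (pvStep m)^[(insert u (pvElems m)).card] {u}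

-- Pre_ excludes exactly the inputs with a dependency cycle reachable from table_name: there A
-- (and B alike) recurses forever and Python raises RecursionError.
def Pre_get_dependency_level (table_name : String) (dependencies_map : List (String × List String)) : Prop :=
  ∀ x ∈ pvClo dependencies_map table_name, ∀ d ∈ pvDeps dependencies_map x,
    x ∉ pvClo dependencies_map d

instance (table_name : String) (dependencies_map : List (String × List String)) : Decidable (Pre_get_dependency_level table_name dependencies_map) := by
  unfold Pre_get_dependency_level; infer_instance

def pvWitness_get_dependency_level : String × (List (String × List String)) :=
  ("a", [("a", ["b", "c"]), ("b", ["c"]), ("c", [])])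

def Spec_get_dependency_level (table_name : String) (dependencies_map : List (String × List String)) (out : Int) : Prop := out = get_dependency_level_alt table_name dependencies_map
instance (table_name : String) (dependencies_map : List (String × List String)) (out : Int) : Decidable (Spec_get_dependency_level table_name dependencies_map out) := by unfold Spec_get_dependency_level; infer_instance

-- ===== CLAIM (what is proved, stated in full; the proofs are below) =====
def Claim_equal_get_dependency_level : Prop := ∀ (table_name : String) (dependencies_map : List (String × List String)), Dom_get_dependency_level table_name dependencies_map → Pre_get_dependency_level table_name dependencies_map → Spec_get_dependency_level table_name dependencies_map (get_dependency_level table_name dependencies_map)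

-- ===== LEMMAS AND PROOFS =====

theorem pv_subset_step (m : List (String × List String)) (S : Finset String) : S ⊆ pvStep m S :=
  Finset.subset_union_left

theorem pv_subset_iterate (m : List (String × List String)) (k : Nat) (S : Finset String) :
    S ⊆ (pvStep m)^[k] S := by
  induction k generalizing S with
  | zero => simp
  | succ k ih =>
    rw [Function.iterate_succ_apply]
    exact (pv_subset_step m S).trans (ih (pvStep m S))

theorem pv_iterate_mono_succ (m : List (String × List String)) (k : Nat) (S : Finset String) :
    (pvStep m)^[k] S ⊆ (pvStep m)^[k+1] S := by
  rw [Function.iterate_succ_apply']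
  exact pv_subset_step m _

theorem pv_deps_subset_elems (m : List (String × List String)) (u : String) :
    (pvDeps m u).toFinset ⊆ pvElems m := by
  intro x hx
  simp only [List.mem_toFinset] at hx
  unfold pvDeps pvDget at hx
  unfold pvElems
  simp only [List.mem_toFinset, List.mem_append]
  cases hfind : m.find? (fun p => p.1 == u) with
  | none => rw [hfind] at hx; simp at hx
  | some p =>
    rw [hfind] at hx
    simp only [Option.map_some, Option.getD_some] at hx
    exact Or.inr (List.mem_flatMap.mpr ⟨p, List.mem_of_find?_eq_some hfind, hx⟩)

theorem pv_step_subset (m : List (String × List String)) (S U : Finset String)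
    (hU : pvElems m ⊆ U) (hS : S ⊆ U) : pvStep m S ⊆ U := by
  intro x hx
  rcases Finset.mem_union.mp hx with h | h
  · exact hS h
  · obtain ⟨v, _, hxv⟩ := Finset.mem_biUnion.mp h
    exact hU (pv_deps_subset_elems m v hxv)

theorem pv_iterate_subset (m : List (String × List String)) (k : Nat) (S U : Finset String)
    (hU : pvElems m ⊆ U) (hS : S ⊆ U) : (pvStep m)^[k] S ⊆ U := by
  induction k generalizing S with
  | zero => simpa
  | succ k ih =>
    rw [Function.iterate_succ_apply]
    exact ih _ (pv_step_subset m S U hU hS)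

-- pigeonhole: if no iterate is a fixed point among the first k steps, cardinality grows by k
theorem pv_card_grow (m : List (String × List String)) (S : Finset String) (k : Nat)
    (h : ∀ i < k, (pvStep m)^[i+1] S ≠ (pvStep m)^[i] S) :
    k + S.card ≤ ((pvStep m)^[k] S).card := by
  induction k with
  | zero => simp
  | succ k ih =>
    have h1 : k + S.card ≤ ((pvStep m)^[k] S).card := ih (fun i hi => h i (by omega))
    have h2 : ((pvStep m)^[k] S).card < ((pvStep m)^[k+1] S).card :=
      Finset.card_lt_card (lt_of_le_of_ne (pv_iterate_mono_succ m k S)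
        (fun he => h k (by omega) he.symm))
    omega

theorem pv_fix_propagate (m : List (String × List String)) (S : Finset String) (i : Nat)
    (h : (pvStep m)^[i+1] S = (pvStep m)^[i] S) :
    ∀ d, (pvStep m)^[i+d] S = (pvStep m)^[i] S := by
  intro d
  induction d with
  | zero => rfl
  | succ d ih =>
    have : i + (d + 1) = (i + d) + 1 := by omega
    rw [this, Function.iterate_succ_apply', ih]
    exact ((Function.iterate_succ_apply' (pvStep m) i S).symm).trans h

theorem pv_clo_fixed (m : List (String × List String)) (u : String) :
    pvStep m (pvClo m u) = pvClo m u := by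
  have hu : u ∈ insert u (pvElems m) := Finset.mem_insert_self u _
  have hsub : ∀ k, (pvStep m)^[k] {u} ⊆ insert u (pvElems m) := fun k =>
    pv_iterate_subset m k {u} _ (Finset.subset_insert u _) (Finset.singleton_subset_iff.mpr hu)
  have hex : ∃ i < (insert u (pvElems m)).card,
      (pvStep m)^[i+1] ({u} : Finset String) = (pvStep m)^[i] {u} := by
    by_contra hno
    push Not at hno
    have hgrow := pv_card_grow m {u} (insert u (pvElems m)).card
      (fun i hi => hno i hi)
    have hle := Finset.card_le_card (hsub (insert u (pvElems m)).card)
    simp [Finset.card_singleton] at hgrow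
    omega
  obtain ⟨i, hiK, hfix⟩ := hex
  have hK : (pvStep m)^[(insert u (pvElems m)).card] ({u} : Finset String)
      = (pvStep m)^[i] {u} := by
    have h1 := pv_fix_propagate m {u} i hfix ((insert u (pvElems m)).card - i)
    have h2 : i + ((insert u (pvElems m)).card - i) = (insert u (pvElems m)).card := by omega
    rwa [h2] at h1
  show pvStep m ((pvStep m)^[(insert u (pvElems m)).card] {u})
      = (pvStep m)^[(insert u (pvElems m)).card] {u}
  rw [hK]
  exact ((Function.iterate_succ_apply' (pvStep m) i {u}).symm).trans hfix

theorem pv_mem_clo_self (m : List (String × List String)) (u : String) : u ∈ pvClo m u :=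
  pv_subset_iterate m _ {u} (Finset.mem_singleton_self u)

theorem pv_clo_closed (m : List (String × List String)) (u v d : String)
    (hv : v ∈ pvClo m u) (hd : d ∈ pvDeps m v) : d ∈ pvClo m u := by
  rw [← pv_clo_fixed m u]
  exact Finset.mem_union.mpr (Or.inr
    (Finset.mem_biUnion.mpr ⟨v, hv, List.mem_toFinset.mpr hd⟩))

theorem pv_clo_least (m : List (String × List String)) (v : String) (C : Finset String)
    (hC : ∀ x ∈ C, ∀ d ∈ pvDeps m x, d ∈ C) (hv : v ∈ C) : pvClo m v ⊆ C := by
  suffices h : ∀ k (S : Finset String), S ⊆ C → (pvStep m)^[k] S ⊆ C from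
    h _ {v} (Finset.singleton_subset_iff.mpr hv)
  intro k
  induction k with
  | zero => intro S hS; simpa
  | succ k ih =>
    intro S hS
    rw [Function.iterate_succ_apply]
    apply ih
    intro x hx
    rcases Finset.mem_union.mp hx with h | h
    · exact hS h
    · obtain ⟨w, hw, hxw⟩ := Finset.mem_biUnion.mp h
      exact hC w (hS hw) x (List.mem_toFinset.mp hxw)

theorem pv_clo_deps_subset (m : List (String × List String)) (u d : String)
    (hd : d ∈ pvDeps m u) : pvClo m d ⊆ pvClo m u := by
  apply pv_clo_least
  · intro x hx e he; exact pv_clo_closed m u x e hx he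
  · exact pv_clo_closed m u u d (pv_mem_clo_self m u) hd

def pvMu (m : List (String × List String)) (u : String) : Nat := (pvClo m u).card

theorem pv_mu_pos (m : List (String × List String)) (u : String) : 1 ≤ pvMu m u :=
  Finset.card_pos.mpr ⟨u, pv_mem_clo_self m u⟩

theorem pv_mu_le_fuel (m : List (String × List String)) (u : String) : pvMu m u ≤ pvFuel m := by
  have h1 : pvClo m u ⊆ insert u (pvElems m) :=
    pv_iterate_subset m _ {u} _ (Finset.subset_insert u _)
      (Finset.singleton_subset_iff.mpr (Finset.mem_insert_self u _))
  have h2 : (insert u (pvElems m)).card ≤ (pvElems m).card + 1 := Finset.card_insert_le u _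
  have h3 : (pvElems m).card ≤ (m.map Prod.fst ++ m.flatMap Prod.snd).length :=
    List.toFinset_card_le _
  have h4 : (m.map Prod.fst ++ m.flatMap Prod.snd).length
      = m.length + (m.map (fun p => p.2.length)).sum := by
    simp [List.length_append, List.length_flatMap]
  have h5 := Finset.card_le_card h1
  unfold pvMu pvFuel
  omega

theorem pv_descent (m : List (String × List String)) (tn : String)
    (hacy : ∀ x ∈ pvClo m tn, ∀ d ∈ pvDeps m x, x ∉ pvClo m d)
    (u : String) (hu : u ∈ pvClo m tn)
    (l : List String) (hget : pvDget m u = some l) (d : String) (hd : d ∈ l) :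
    pvMu m d < pvMu m u := by
  have hdep : d ∈ pvDeps m u := by unfold pvDeps; rw [hget]; exact hd
  have hsub : pvClo m d ⊆ pvClo m u := pv_clo_deps_subset m u d hdep
  have hnot : u ∉ pvClo m d := hacy u hu d hdep
  exact Finset.card_lt_card ⟨hsub, fun hcon => hnot (hcon (pv_mem_clo_self m u))⟩

theorem pv_alevel_nonneg (m : List (String × List String)) (f : Nat) (u : String) :
    0 ≤ pvALevel m f u := by
  induction f generalizing u with
  | zero => simp [pvALevel]
  | succ f ih =>
    simp only [pvALevel]
    cases pvDget m u with
    | none => simp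
    | some deps =>
      simp only
      split_ifs with hnil
      · exact le_refl 0
      · have := (PySem.List.le_foldl_max_int deps (fun d => pvALevel m f d) 0).1
        omega

-- A's value does not depend on the fuel, once the fuel is at least μ(u) (acyclic maps only)
theorem pv_alevel_fuel_indep (m : List (String × List String)) (tn : String)
    (hacy : ∀ x ∈ pvClo m tn, ∀ d ∈ pvDeps m x, x ∉ pvClo m d) :
    ∀ f f' u, u ∈ pvClo m tn → pvMu m u ≤ f → pvMu m u ≤ f' →
      pvALevel m f u = pvALevel m f' u := by
  intro f
  induction f with
  | zero => intro f' u _ hf _; exact absurd hf (by have := pv_mu_pos m u; omega)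
  | succ f ih =>
    intro f' u hu hf hf'
    cases f' with
    | zero => exact absurd hf' (by have := pv_mu_pos m u; omega)
    | succ g =>
      simp only [pvALevel]
      cases hget : pvDget m u with
      | none => rfl
      | some deps =>
        simp only
        split_ifs with hnil
        · rfl
        · have hfold : deps.foldl (fun mx d => max mx (pvALevel m f d)) 0
              = deps.foldl (fun mx d => max mx (pvALevel m g d)) 0 := by
            apply PySem.List.foldl_congr_mem
            intro acc d hd
            have hlt := pv_descent m tn hacy u hu deps hget d hd
            have hdu : d ∈ pvClo m tn := pv_clo_closed m tn u d hu
              (by unfold pvDeps; rw [hget]; exact hd)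
            rw [ih g d hdu (by omega) (by omega)]
          rw [hfold]

-- memo invariant for B: every cached value is the canonical level (= A's port at full fuel)
def pvInv (m : List (String × List String)) (memo : PySem.Dict String Int) : Prop :=
  ∀ k v, memo.get? k = some v → v = pvALevel m (pvFuel m) k

-- unfolding A's value at a key with nonempty dependencies, at full fuel on both sides
theorem pv_T_key (m : List (String × List String)) (tn : String)
    (hacy : ∀ x ∈ pvClo m tn, ∀ d ∈ pvDeps m x, x ∉ pvClo m d)
    (u : String) (hu : u ∈ pvClo m tn)
    (l : List String) (hget : pvDget m u = some l) (hnil : l ≠ []) :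
    pvALevel m (pvFuel m) u
      = (l.foldl (fun mx d => max mx (pvALevel m (pvFuel m) d)) 0) + 1 := by
  obtain ⟨F, hF⟩ : ∃ F, pvFuel m = F + 1 := ⟨pvFuel m - 1, by unfold pvFuel; omega⟩
  conv_lhs => rw [hF]
  simp only [pvALevel, hget]
  rw [if_neg hnil]
  congr 1
  apply PySem.List.foldl_congr_mem
  intro acc d hd
  have hlt := pv_descent m tn hacy u hu l hget d hd
  have hdu : d ∈ pvClo m tn := pv_clo_closed m tn u d hu
    (by unfold pvDeps; rw [hget]; exact hd)
  have hmu : pvMu m u ≤ pvFuel m := pv_mu_le_fuel m u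
  rw [pv_alevel_fuel_indep m tn hacy F (pvFuel m) d hdu (by omega) (by omega)]

theorem pv_foldl_init (l : List String) (g : String → Int) (hnil : l ≠ [])
    (hpos : ∀ d ∈ l, 0 ≤ g d) :
    l.foldl (fun a d => max a (g d)) (-1) = l.foldl (fun a d => max a (g d)) 0 := by
  cases l with
  | nil => exact absurd rfl hnil
  | cons d ds =>
    simp only [List.foldl]
    have h0 : 0 ≤ g d := hpos d (List.mem_cons_self)
    have : max (-1 : Int) (g d) = max 0 (g d) := by omega
    rw [this]

theorem pv_bmax_spec (m : List (String × List String)) (tn : String) (f : Nat)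
    (HI : ∀ u memo, u ∈ pvClo m tn → pvMu m u ≤ f → pvInv m memo →
      (pvBLevel m f memo u).1 = pvALevel m (pvFuel m) u ∧ pvInv m (pvBLevel m f memo u).2) :
    ∀ (ds : List String) (acc : Int) (memo : PySem.Dict String Int), pvInv m memo →
      (∀ d ∈ ds, d ∈ pvClo m tn ∧ pvMu m d ≤ f) →
      (pvBMax m f memo ds acc).1
          = ds.foldl (fun a d => max a (pvALevel m (pvFuel m) d)) acc
        ∧ pvInv m (pvBMax m f memo ds acc).2 := by
  intro ds
  induction ds with
  | nil => intro acc memo hInv _; simp only [pvBMax]; exact ⟨rfl, hInv⟩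
  | cons d ds ih =>
    intro acc memo hInv hmu
    obtain ⟨hd1, hd2⟩ := hmu d List.mem_cons_self
    obtain ⟨hv, hInv'⟩ := HI d memo hd1 hd2 hInv
    simp only [pvBMax]
    rcases hpe : pvBLevel m f memo d with ⟨v, memo'⟩
    rw [hpe] at hv hInv'
    simp only at hv hInv'
    obtain ⟨h1, h2⟩ := ih (max acc v) memo' hInv' (fun e he => hmu e (List.mem_cons_of_mem d he))
    refine ⟨?_, h2⟩
    rw [h1, List.foldl_cons, hv]

theorem pv_blevel_spec (m : List (String × List String)) (tn : String)
    (hacy : ∀ x ∈ pvClo m tn, ∀ d ∈ pvDeps m x, x ∉ pvClo m d) :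
    ∀ (f : Nat) (u : String) (memo : PySem.Dict String Int), u ∈ pvClo m tn →
      pvMu m u ≤ f → pvInv m memo →
      (pvBLevel m f memo u).1 = pvALevel m (pvFuel m) u ∧ pvInv m (pvBLevel m f memo u).2 := by
  intro f
  induction f with
  | zero => intro u memo _ hf _; exact absurd hf (by have := pv_mu_pos m u; omega)
  | succ f ih =>
    intro u memo hu hf hInv
    simp only [pvBLevel]
    cases hm : memo.get? u with
    | some v => exact ⟨hInv u v hm, hInv⟩
    | none =>
      obtain ⟨F, hF⟩ : ∃ F, pvFuel m = F + 1 := ⟨pvFuel m - 1, by unfold pvFuel; omega⟩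
      cases hget : pvDget m u with
      | none =>
        simp only [Option.getD_none, pvBMax]
        constructor
        · show (1 : Int) + (-1) = pvALevel m (pvFuel m) u
          rw [hF]; simp [pvALevel, hget]
        · intro k v hkv
          rw [PySem.Dict.get?_insert] at hkv
          split_ifs at hkv with hk
          · subst hk
            have : v = 1 + (-1 : Int) := by symm; simpa using hkv
            rw [this, hF]; simp [pvALevel, hget]
          · exact hInv k v hkv
      | some l =>
        by_cases hnil : l = []
        · subst hnil
          simp only [Option.getD_some, pvBMax]
          constructor
          · show (1 : Int) + (-1) = pvALevel m (pvFuel m) u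
            rw [hF]; simp [pvALevel, hget]
          · intro k v hkv
            rw [PySem.Dict.get?_insert] at hkv
            split_ifs at hkv with hk
            · subst hk
              have : v = 1 + (-1 : Int) := by symm; simpa using hkv
              rw [this, hF]; simp [pvALevel, hget]
            · exact hInv k v hkv
        · have hmuall : ∀ d ∈ l, d ∈ pvClo m tn ∧ pvMu m d ≤ f := fun d hd => by
            have h1 := pv_descent m tn hacy u hu l hget d hd
            have h2 : d ∈ pvClo m tn := pv_clo_closed m tn u d hu
              (by unfold pvDeps; rw [hget]; exact hd)
            exact ⟨h2, by omega⟩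
          obtain ⟨hmx, hInv'⟩ := pv_bmax_spec m tn f ih l (-1) memo hInv hmuall
          simp only [Option.getD_some]
          rcases hpe : pvBMax m f memo l (-1) with ⟨mx, memo'⟩
          rw [hpe] at hmx hInv'
          simp only at hmx hInv'
          have hval : (1 : Int) + mx = pvALevel m (pvFuel m) u := by
            rw [hmx, pv_foldl_init l _ hnil (fun d _ => pv_alevel_nonneg m (pvFuel m) d),
              pv_T_key m tn hacy u hu l hget hnil]
            omega
          constructor
          · exact hval
          · intro k v hkv
            rw [PySem.Dict.get?_insert] at hkv
            split_ifs at hkv with hk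
            · subst hk
              have : v = 1 + mx := by symm; simpa using hkv
              rw [this]; exact hval
            · exact hInv' k v hkv

-- ===== VERDICT (by name: the statement is the Claim_ definition above) =====
theorem get_dependency_level_spec : Claim_equal_get_dependency_level := by
  intro tn m _hdom hpre
  unfold Spec_get_dependency_level get_dependency_level get_dependency_level_alt
  have hempty : pvInv m PySem.Dict.empty := by
    intro k v hkv
    rw [PySem.Dict.get?_empty] at hkv
    exact absurd hkv (by simp)
  exact (pv_blevel_spec m tn hpre (pvFuel m) tn PySem.Dict.empty (pv_mem_clo_self m tn)
    (pv_mu_le_fuel m tn) hempty).1.symm
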